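-- pv_equiv track=rewrite | github.com/johnvojtech/morph_analysis | base.py | get_schemata
-- ===== SOURCE A (Python) =====
-- def good(schema, shortest, lemmas):
--     """lemma contains the substring specified by "schema", "shortest" """
--     OK = True
--     for lemma in lemmas:
--         OK = any(all(lemma[j + i] == shortest[i] for i in schema) for j in range(-schema[0], len(lemma) - schema[-1]))
--         if not OK:
--             return False
--     return True
--
-- def variants(schema, shortest, lemmas):
--     """generates possible variants of the schema"""
--     schemata = []
--     start = 0
--     if len(schema)>0:
--         start = schema[-1] + 1
--     for j in range(start, len(shortest)):
--         new_schema = schema + [j]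
--         if good(new_schema, shortest, lemmas):
--             schemata.append(new_schema)
--     return(schemata)
--
-- def get_schemata(lemmas):
--     """for lemmas, returns longest common substring (with wildcards)"""
--     shortest = min(lemmas, key=len)
--     schemata = [[]]
--     max_len = -1
--     new_max = 0
--     new = []
--     while(max_len < new_max):
--         max_len = new_max
--         for schema in schemata.copy():
--             new_schemata = variants(schema, shortest, lemmas)
--             if len(new_schemata) > 0 and schema in schemata:
--                 schemata.remove(schema)
--             schemata = schemata + new_schemata
--         if len(schemata[0]) == 0:
--             return []
--         #chemata = prune(schemata, len(shortest))
--         new_max = len(max(schemata, key=len))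
--
--     schemata = [schema for schema in schemata if len(schema) == max_len]
--     return [[(i - schema[0], shortest[i]) for i in schema] for schema in schemata]
-- ===== SOURCE B (Python) =====
-- def good(schema, shortest, lemmas):
--     """lemma contains the substring specified by "schema", "shortest" """
--     OK = True
--     for lemma in lemmas:
--         OK = any(all(lemma[j + i] == shortest[i] for i in schema) for j in range(-schema[0], len(lemma) - schema[-1]))
--         if not OK:
--             return False
--     return True
--
-- def get_schemata(lemmas):
--     """for lemmas, returns longest common substring (with wildcards): DFS over gapped-pattern prefixes"""
--     shortest = min(lemmas, key=len)
--     n = len(shortest)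
--
--     def dfs(schema, start):
--         # returns (depth, list of deepest good descendants of schema, in lex order)
--         best_d, best = len(schema), [schema]
--         for j in range(start, n):
--             child = schema + [j]
--             if good(child, shortest, lemmas):
--                 d, ss = dfs(child, j + 1)
--                 if d > best_d:
--                     best_d, best = d, ss
--                 elif d == best_d:
--                     best = best + ss
--         return best_d, best
--
--     depth, deepest = dfs([], 0)
--     if depth == 0:
--         return []
--     return [[(i - s[0], shortest[i]) for i in s] for s in deepest]
-- ===== Notes on version B (the rewrite author's own statement) =====
-- stated objective: alternative
-- what changed: A's round-by-round whole-population BFS (one mutable list of schemata that is rescanned, pruned with remove() and regrown every round, with max()/copy() bookkeeping) is replaced by a recursive DFS over the tree of gapped-pattern prefixes that tracks the deepest depth reached and collects all schemata at that depth; good() and the output mapping are kept verbatim.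
import Mathlib
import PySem

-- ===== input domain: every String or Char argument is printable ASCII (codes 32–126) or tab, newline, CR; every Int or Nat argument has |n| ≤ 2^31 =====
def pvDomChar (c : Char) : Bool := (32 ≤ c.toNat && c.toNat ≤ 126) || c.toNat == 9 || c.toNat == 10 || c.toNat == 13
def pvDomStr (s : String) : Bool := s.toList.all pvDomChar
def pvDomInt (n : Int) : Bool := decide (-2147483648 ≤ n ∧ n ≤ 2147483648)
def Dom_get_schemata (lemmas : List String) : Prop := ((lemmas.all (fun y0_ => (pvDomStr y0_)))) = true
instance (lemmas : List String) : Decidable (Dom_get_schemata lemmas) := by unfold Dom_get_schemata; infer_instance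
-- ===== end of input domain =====

-- B replaces A's round-by-round whole-population BFS (one mutable list of schemata, rescanned,
-- pruned with remove() and regrown each round) by a recursive DFS over the tree of gapped-pattern
-- prefixes that tracks the deepest depth reached and collects the schemata at it;
-- `good` and the output mapping are kept verbatim.

-- ===== PORT A =====

-- shared helper `good` (identical in Source A and Source B): exact wherever the indices j+i / i are in
-- range, which holds on every call either program makes (j ≥ -schema[0], j < len(lemma)-schema[-1],
-- schema increasing, i < len(shortest)).
def good (schema : List Int) (shortest : List Char) (lemmas : List (List Char)) : Bool :=
  lemmas.all (fun lm =>
    (PySem.List.pyRange (-(PySem.List.pyGetD schema 0 0))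
        ((lm.length : Int) - PySem.List.pyGetD schema (-1) 0) 1).any
      (fun j => schema.all (fun i =>
        PySem.List.pyGet? lm (j + i) == PySem.List.pyGet? shortest i)))

def variants (schema : List Int) (shortest : List Char) (lemmas : List (List Char)) : List (List Int) :=
  let start : Int := if 0 < schema.length then PySem.List.pyGetD schema (-1) 0 + 1 else 0
  (PySem.List.pyRange start (shortest.length : Int) 1).foldl
    (fun acc j => if good (schema ++ [j]) shortest lemmas then acc ++ [schema ++ [j]] else acc) []

-- shared output mapping `[(i - schema[0], shortest[i]) for i in schema]` (identical comprehension in both files)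
def formatR (shortest : List Char) (schema : List Int) : List (Int × String) :=
  schema.map (fun i => (i - PySem.List.pyGetD schema 0 0,
    match PySem.List.pyGet? shortest i with
    | some c => String.ofList [c]
    | none => ""))

-- one step of A's `for schema in schemata.copy():` body
def stepA (shortest : List Char) (lemmas : List (List Char))
    (cur : List (List Int)) (schema : List Int) : List (List Int) :=
  let ns := variants schema shortest lemmas
  let cur2 := if 0 < ns.length ∧ schema ∈ cur then (PySem.List.remove? cur schema).getD cur else cur
  cur2 ++ ns

-- A's while-loop; fuel only makes the recursion structural (it is proved never to run out)
def loopA (shortest : List Char) (lemmas : List (List Char)) :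
    Nat → Int → Int → List (List Int) → List (List (Int × String))
  | 0, _, _, _ => []
  | fuel + 1, maxLen, newMax, schemata =>
    if maxLen < newMax then
      let schemata2 := schemata.foldl (stepA shortest lemmas) schemata
      if (schemata2.headD []).length == 0 then []
      else
        let newMax2 : Int := match PySem.List.max? schemata2 (fun s => PySem.List.len s) with
          | some m => PySem.List.len m
          | none => 0
        loopA shortest lemmas fuel newMax newMax2 schemata2
    else
      (schemata.filter (fun s => (PySem.List.len s) == maxLen)).map (formatR shortest)

def get_schemata (lemmas : List String) : List (List (Int × String)) :=
  match PySem.List.min? lemmas (fun s => PySem.Str.len s) with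
  | none => []   -- unreachable under Pre_ (Python: min([]) raises ValueError)
  | some shortestS =>
    let shortest := shortestS.toList
    let lem := lemmas.map String.toList
    loopA shortest lem (shortest.length + 2) (-1) 0 [[]]

-- ===== PORT B =====

-- merging a child's (depth, schemata) result into the running best (the if/elif in Source B's dfs)
def dfsMerge (best child : Nat × List (List Int)) : Nat × List (List Int) :=
  if child.1 > best.1 then child
  else if child.1 = best.1 then (best.1, best.2 ++ child.2) else best

mutual
-- Source B's `for j in range(start, n)` loop, over the materialized range, with `best` as accumulator
def dfsGo (shortest : List Char) (lemmas : List (List Char)) (schema : List Int) :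
    List Int → Nat × List (List Int) → Nat × List (List Int)
  | [], best => best
  | j :: rest, best =>
    let best' := if good (schema ++ [j]) shortest lemmas
      then dfsMerge best (dfsNode shortest lemmas (schema ++ [j]) rest)
      else best
    dfsGo shortest lemmas schema rest best'
termination_by avail _ => (avail.length, 0)

def dfsNode (shortest : List Char) (lemmas : List (List Char)) (schema : List Int)
    (avail : List Int) : Nat × List (List Int) :=
  dfsGo shortest lemmas schema avail (schema.length, [schema])
termination_by (avail.length, 1)
end

def get_schemata_alt (lemmas : List String) : List (List (Int × String)) :=
  match PySem.List.min? lemmas (fun s => PySem.Str.len s) with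
  | none => []   -- unreachable under Pre_ (Python: min([]) raises ValueError)
  | some shortestS =>
    let shortest := shortestS.toList
    let lem := lemmas.map String.toList
    let r := dfsNode shortest lem [] (PySem.List.pyRange 0 (shortest.length : Int) 1)
    if r.1 == 0 then [] else r.2.map (formatR shortest)

-- ===== PRECONDITION & SPEC =====
-- Pre_ excludes only the empty list, on which Python's min([]) raises ValueError.
def Pre_get_schemata (lemmas : List String) : Prop := lemmas ≠ []
instance (lemmas : List String) : Decidable (Pre_get_schemata lemmas) := by
  unfold Pre_get_schemata; infer_instance

def pvWitness_get_schemata : List String := ["abc", "xbc"]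

def Spec_get_schemata (lemmas : List String) (out : List (List (Int × String))) : Prop := out = get_schemata_alt lemmas
instance (lemmas : List String) (out : List (List (Int × String))) : Decidable (Spec_get_schemata lemmas out) := by unfold Spec_get_schemata; infer_instance

-- ===== CLAIM (what is proved, stated in full; the proofs are below) =====
def Claim_equal_get_schemata : Prop := ∀ (lemmas : List String), Dom_get_schemata lemmas → Pre_get_schemata lemmas → Spec_get_schemata lemmas (get_schemata lemmas)

-- ===== LEMMAS AND PROOFS =====

-- levels of the tree of good schemata, rooted at `s` (children = `variants`)
def lvlFrom (shortest : List Char) (lemmas : List (List Char)) (s : List Int) : Nat → List (List Int)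
  | 0 => [s]
  | k + 1 => (variants s shortest lemmas).flatMap (fun c => lvlFrom shortest lemmas c k)

-- levels rooted at `s` but with the FIRST extension restricted to indices ≥ t
def lvlFromT (shortest : List Char) (lemmas : List (List Char)) (s : List Int) (t : Int) :
    Nat → List (List Int)
  | 0 => [s]
  | k + 1 =>
    (((PySem.List.pyRange t (shortest.length : Int) 1).filter
        (fun j => good (s ++ [j]) shortest lemmas)).map (fun j => s ++ [j])).flatMap
      (fun c => lvlFrom shortest lemmas c k)

def startOf (s : List Int) : Int :=
  if 0 < s.length then PySem.List.pyGetD s (-1) 0 + 1 else 0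

-- B-proof helper: the merged best over the remaining children (the foldr view of Source B's loop)
def KB (shortest : List Char) (lemmas : List (List Char)) (s : List Int) :
    List Int → Nat × List (List Int)
  | [] => (0, [])
  | j :: rest =>
    dfsMerge (if good (s ++ [j]) shortest lemmas
                then dfsNode shortest lemmas (s ++ [j]) rest else (0, []))
      (KB shortest lemmas s rest)

lemma variants_eq (s : List Int) (sh : List Char) (lm : List (List Char)) :
    variants s sh lm =
      ((PySem.List.pyRange (startOf s) (sh.length : Int) 1).filter
        (fun j => good (s ++ [j]) sh lm)).map (fun j => s ++ [j]) := by
  simp [variants, startOf, PySem.List.foldl_append_if]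

lemma startOf_append (s : List Int) (t : Int) : startOf (s ++ [t]) = t + 1 := by
  simp [startOf, PySem.List.pyGetD_neg_one_append_singleton]

lemma lvlFrom_one (sh : List Char) (lm : List (List Char)) (s : List Int) :
    lvlFrom sh lm s 1 = variants s sh lm := by
  simp [lvlFrom]

lemma lvlFromT_canon (sh : List Char) (lm : List (List Char)) (s : List Int) (k : Nat) :
    lvlFromT sh lm s (startOf s) k = lvlFrom sh lm s k := by
  cases k with
  | zero => rfl
  | succ k => simp [lvlFromT, lvlFrom, variants_eq]

lemma lvlFromT_ge (sh : List Char) (lm : List (List Char)) (s : List Int) (t : Int)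
    (ht : (sh.length : Int) ≤ t) (k : Nat) : lvlFromT sh lm s t (k + 1) = [] := by
  simp [lvlFromT, PySem.List.pyRange_one_eq_nil ht]

lemma lvlFromT_cons (sh : List Char) (lm : List (List Char)) (s : List Int) (t : Int)
    (ht : t < (sh.length : Int)) (k : Nat) :
    lvlFromT sh lm s t (k + 1) =
      (if good (s ++ [t]) sh lm then lvlFrom sh lm (s ++ [t]) k else [])
        ++ lvlFromT sh lm s (t + 1) (k + 1) := by
  rw [lvlFromT, PySem.List.pyRange_one_cons ht]
  by_cases hg : good (s ++ [t]) sh lm <;> simp [hg, lvlFromT]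

lemma lvlFrom_succ_right (sh : List Char) (lm : List (List Char)) (k : Nat) :
    ∀ s, lvlFrom sh lm s (k + 1) = (lvlFrom sh lm s k).flatMap (fun c => variants c sh lm) := by
  induction k with
  | zero => intro s; simp [lvlFrom]
  | succ k ih =>
    intro s
    show (variants s sh lm).flatMap (fun c => lvlFrom sh lm c (k + 1)) = _
    calc (variants s sh lm).flatMap (fun c => lvlFrom sh lm c (k + 1))
        = (variants s sh lm).flatMap
            (fun c => (lvlFrom sh lm c k).flatMap (fun c' => variants c' sh lm)) := by
          simp only [ih]
      _ = ((variants s sh lm).flatMap (fun c => lvlFrom sh lm c k)).flatMap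
            (fun c' => variants c' sh lm) := by
          rw [List.flatMap_assoc]
      _ = _ := rfl

lemma lvlFrom_empty_mono (sh : List Char) (lm : List (List Char)) (s : List Int) {k m : Nat}
    (hk : 1 ≤ k) (hkm : k ≤ m) (h : lvlFrom sh lm s k = []) : lvlFrom sh lm s m = [] := by
  induction m with
  | zero => omega
  | succ m ih =>
    rcases Nat.lt_or_ge k (m + 1) with hlt | hge
    · have hm : lvlFrom sh lm s m = [] := ih (by omega)
      rw [lvlFrom_succ_right, hm]; rfl
    · have : k = m + 1 := by omega
      subst this; exact h

lemma lvlFromT_empty_step (sh : List Char) (lm : List (List Char)) (s : List Int) (t : Int)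
    {k : Nat} (h : lvlFromT sh lm s t (k + 1) = []) : lvlFromT sh lm s t (k + 2) = [] := by
  rw [lvlFromT, List.flatMap_eq_nil_iff] at h
  rw [show k + 2 = (k + 1) + 1 from rfl, lvlFromT, List.flatMap_eq_nil_iff]
  intro c hc
  cases k with
  | zero => exact absurd (h c hc) (by simp [lvlFrom])
  | succ k' => exact lvlFrom_empty_mono sh lm c (k := k' + 1) (by omega) (by omega) (h c hc)

lemma lvlFromT_empty_mono (sh : List Char) (lm : List (List Char)) (s : List Int) (t : Int)
    {k m : Nat} (hk : 1 ≤ k) (hkm : k ≤ m) (h : lvlFromT sh lm s t k = []) :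
    lvlFromT sh lm s t m = [] := by
  induction m with
  | zero => omega
  | succ m ih =>
    rcases Nat.lt_or_ge k (m + 1) with hlt | hge
    · have hm : lvlFromT sh lm s t m = [] := ih (by omega)
      cases m with
      | zero => omega
      | succ m' => exact lvlFromT_empty_step sh lm s t hm
    · have : k = m + 1 := by omega
      subst this; exact h

lemma variants_shape (s : List Int) (sh : List Char) (lm : List (List Char)) {x : List Int}
    (hx : x ∈ variants s sh lm) :
    ∃ j, x = s ++ [j] ∧ startOf s ≤ j ∧ j < (sh.length : Int) := by
  rw [variants_eq] at hx
  rcases List.mem_map.mp hx with ⟨j, hj, rfl⟩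
  rcases List.mem_filter.mp hj with ⟨hjr, _⟩
  rw [PySem.List.mem_pyRange_one] at hjr
  exact ⟨j, rfl, hjr.1, hjr.2⟩

lemma lvlFrom_length (sh : List Char) (lm : List (List Char)) (k : Nat) :
    ∀ s x, x ∈ lvlFrom sh lm s k → x.length = s.length + k := by
  induction k with
  | zero => intro s x hx; simp [lvlFrom] at hx; subst hx; rfl
  | succ k ih =>
    intro s x hx
    rw [lvlFrom, List.mem_flatMap] at hx
    rcases hx with ⟨c, hc, hx⟩
    rcases variants_shape s sh lm hc with ⟨j, rfl, _, _⟩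
    have := ih (s ++ [j]) x hx
    simp at this ⊢; omega

-- invariant: reachable schemata are nonnegative, bounded, duplicate-free index lists below their start
def InvS (sh : List Char) (s : List Int) : Prop :=
  s.Nodup ∧ ∀ x ∈ s, 0 ≤ x ∧ x < (sh.length : Int) ∧ x < startOf s

lemma startOf_nonneg (sh : List Char) {s : List Int} (hs : InvS sh s) : 0 ≤ startOf s := by
  unfold startOf
  split
  · rename_i hpos
    have hne : s ≠ [] := by intro h; subst h; simp at hpos
    rw [PySem.List.pyGetD_neg_one s 0 hne]
    have := (hs.2 (s.getLast hne) (List.getLast_mem hne)).1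
    omega
  · omega

lemma invS_variants (sh : List Char) (lm : List (List Char)) {s x : List Int}
    (hs : InvS sh s) (hx : x ∈ variants s sh lm) : InvS sh x := by
  rcases variants_shape s sh lm hx with ⟨j, rfl, hj1, hj2⟩
  obtain ⟨hnd, hmem⟩ := hs
  constructor
  · rw [List.nodup_append]
    refine ⟨hnd, List.nodup_singleton j, ?_⟩
    intro y hy b hb
    simp only [List.mem_singleton] at hb; subst hb
    have := (hmem y hy).2.2
    omega
  · intro y hy
    rw [startOf_append]
    rcases List.mem_append.mp hy with hy | hy
    · have := hmem y hy
      omega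
    · simp at hy; subst hy
      have h0 : 0 ≤ startOf s := startOf_nonneg sh ⟨hnd, hmem⟩
      omega

lemma invS_lvlFrom (sh : List Char) (lm : List (List Char)) (k : Nat) :
    ∀ s x, InvS sh s → x ∈ lvlFrom sh lm s k → InvS sh x := by
  induction k with
  | zero => intro s x hs hx; simp [lvlFrom] at hx; subst hx; exact hs
  | succ k ih =>
    intro s x hs hx
    rw [lvlFrom, List.mem_flatMap] at hx
    rcases hx with ⟨c, hc, hx⟩
    exact ih c x (invS_variants sh lm hs hc) hx

lemma invS_length_le (sh : List Char) {x : List Int} (h : InvS sh x) : x.length ≤ sh.length := by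
  obtain ⟨hnd, hmem⟩ := h
  have hsub : x ⊆ PySem.List.pyRange 0 (sh.length : Int) 1 := by
    intro y hy
    rw [PySem.List.mem_pyRange_one]
    exact ⟨(hmem y hy).1, (hmem y hy).2.1⟩
  calc x.length = x.toFinset.card := (List.toFinset_card_of_nodup hnd).symm
    _ ≤ (PySem.List.pyRange 0 (sh.length : Int) 1).toFinset.card :=
        Finset.card_le_card (by intro a ha; simp only [List.mem_toFinset] at ha ⊢; exact hsub ha)
    _ ≤ (PySem.List.pyRange 0 (sh.length : Int) 1).length := List.toFinset_card_le _
    _ = sh.length := by rw [PySem.List.length_pyRange_one]; omega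

lemma lvlFrom_top_empty (sh : List Char) (lm : List (List Char)) :
    lvlFrom sh lm [] (sh.length + 1) = [] := by
  rw [List.eq_nil_iff_forall_not_mem]
  intro x hx
  have h1 : x.length = ([] : List Int).length + (sh.length + 1) :=
    lvlFrom_length sh lm (sh.length + 1) [] x hx
  have h2 : InvS sh x := invS_lvlFrom sh lm (sh.length + 1) [] x (by constructor <;> simp) hx
  have := invS_length_le sh h2
  simp at h1; omega

-- ===== A-side loop lemmas =====

lemma stepA_dead (sh : List Char) (lm : List (List Char)) (cur : List (List Int))
    {d : List Int} (hd : variants d sh lm = []) : stepA sh lm cur d = cur := by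
  simp [stepA, hd]

lemma foldl_stepA_dead (sh : List Char) (lm : List (List Char)) :
    ∀ (L : List (List Int)) (cur : List (List Int)), (∀ d ∈ L, variants d sh lm = []) →
      L.foldl (stepA sh lm) cur = cur := by
  intro L
  induction L with
  | nil => intro cur _; rfl
  | cons d L ih =>
    intro cur hdead
    rw [List.foldl_cons, stepA_dead sh lm cur (hdead d (by simp))]
    exact ih cur (fun x hx => hdead x (by simp [hx]))

lemma foldl_stepA_run (sh : List Char) (lm : List (List Char)) :
    ∀ (F A E : List (List Int)), (∀ a ∈ A, variants a sh lm = []) →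
      F.foldl (stepA sh lm) (A ++ F ++ E) =
        A ++ F.filter (fun f => variants f sh lm = []) ++ E
          ++ F.flatMap (fun f => variants f sh lm) := by
  intro F
  induction F with
  | nil => intro A E _; simp
  | cons f F ih =>
    intro A E hA
    rw [List.foldl_cons]
    by_cases hf : variants f sh lm = []
    · rw [stepA_dead sh lm _ hf]
      have h1 : A ++ (f :: F) ++ E = (A ++ [f]) ++ F ++ E := by simp
      rw [h1, ih (A ++ [f]) E (by
        intro a ha
        rcases List.mem_append.mp ha with ha | ha
        · exact hA a ha
        · simp at ha; subst ha; exact hf)]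
      simp [hf]
    · have hfA : f ∉ A := fun hmem => hf (hA f hmem)
      have hmemf : f ∈ A ++ (f :: F) ++ E := by simp
      have hcond : (0 < (variants f sh lm).length ∧ f ∈ A ++ (f :: F) ++ E) := by
        refine ⟨?_, hmemf⟩
        cases hv : variants f sh lm with
        | nil => exact absurd hv hf
        | cons a l => simp
      have hstep : stepA sh lm (A ++ (f :: F) ++ E) f = A ++ F ++ (E ++ variants f sh lm) := by
        show (if 0 < (variants f sh lm).length ∧ f ∈ A ++ (f :: F) ++ E
            then (PySem.List.remove? (A ++ (f :: F) ++ E) f).getD (A ++ (f :: F) ++ E)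
            else A ++ (f :: F) ++ E) ++ variants f sh lm = A ++ F ++ (E ++ variants f sh lm)
        rw [if_pos hcond, PySem.List.remove?_eq_some_erase _ _ hmemf, Option.getD_some,
          List.append_assoc, List.cons_append, List.erase_append_right _ hfA]
        simp
      rw [hstep, ih A (E ++ variants f sh lm) hA]
      simp [hf]

lemma bodyA_eq (sh : List Char) (lm : List (List Char)) (D F : List (List Int))
    (hD : ∀ d ∈ D, variants d sh lm = []) :
    (D ++ F).foldl (stepA sh lm) (D ++ F) =
      D ++ F.filter (fun f => variants f sh lm = []) ++ F.flatMap (fun f => variants f sh lm) := by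
  rw [List.foldl_append, foldl_stepA_dead sh lm D (D ++ F) hD]
  have := foldl_stepA_run sh lm F D [] hD
  simpa using this

lemma headD_len_ne_zero {xs : List (List Int)} (hne : xs ≠ []) (h : ∀ x ∈ xs, x ≠ []) :
    ((xs.headD []).length == 0) = false := by
  cases xs with
  | nil => exact absurd rfl hne
  | cons x t =>
    have hx : x ≠ [] := h x (by simp)
    cases x with
    | nil => exact absurd rfl hx
    | cons a b => simp

lemma max?_len_eq {xs : List (List Int)} {m : Nat} (hw : ∃ x ∈ xs, x.length = m)
    (hb : ∀ x ∈ xs, x.length ≤ m) :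
    (match PySem.List.max? xs (fun s => PySem.List.len s) with
      | some mx => PySem.List.len mx
      | none => 0) = (m : Int) := by
  rcases hw with ⟨w, hwmem, hwlen⟩
  have hne : xs ≠ [] := by intro h; subst h; simp at hwmem
  cases hmx : PySem.List.max? xs (fun s => PySem.List.len s) with
  | none => rw [PySem.List.max?_eq_none_iff] at hmx; exact absurd hmx hne
  | some mx =>
    have hmem := PySem.List.max?_mem hmx
    have hismax := PySem.List.max?_isMax hmx
    have h1 : PySem.List.len w ≤ PySem.List.len mx := hismax w hwmem
    have h2 : mx.length ≤ m := hb mx hmem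
    simp only [PySem.List.len_eq] at h1 ⊢
    omega

lemma loopA_succ_eq (sh : List Char) (lm : List (List Char)) (fuel : Nat)
    (maxLen newMax : Int) (schemata : List (List Int)) :
    loopA sh lm (fuel + 1) maxLen newMax schemata =
      if maxLen < newMax then
        (if (((schemata.foldl (stepA sh lm) schemata).headD []).length == 0) = true then []
          else loopA sh lm fuel newMax
            (match PySem.List.max? (schemata.foldl (stepA sh lm) schemata)
                (fun s => PySem.List.len s) with
              | some m => PySem.List.len m
              | none => 0)
            (schemata.foldl (stepA sh lm) schemata))
      else (schemata.filter (fun s => (PySem.List.len s) == maxLen)).map (formatR sh) := rfl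

lemma loopA_run (sh : List Char) (lm : List (List Char)) (K : Nat)
    (hK1 : lvlFrom sh lm [] K ≠ []) (hK2 : lvlFrom sh lm [] (K + 1) = []) :
    ∀ (fuel : Nat) (r : Nat) (D : List (List Int)), 1 ≤ r → r ≤ K →
      lvlFrom sh lm [] r ≠ [] →
      (∀ d ∈ D, variants d sh lm = [] ∧ 1 ≤ d.length ∧ d.length < r) →
      K + 2 ≤ fuel + r →
      loopA sh lm fuel ((r : Int) - 1) (r : Int) (D ++ lvlFrom sh lm [] r) =
        (lvlFrom sh lm [] K).map (formatR sh) := by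
  have hKn : K ≤ sh.length := by
    by_contra hc
    exact hK1 (lvlFrom_empty_mono sh lm [] (k := sh.length + 1) (by omega) (by omega)
      (lvlFrom_top_empty sh lm))
  intro fuel
  induction fuel with
  | zero => intro r D hr1 hrK _ _ hfuel; omega
  | succ fuel ihf =>
    intro r D hr1 hrK hlvlr hD hfuel
    have hlenF : ∀ x ∈ lvlFrom sh lm [] r, x.length = r := by
      intro x hx
      have := lvlFrom_length sh lm r [] x hx
      simpa using this
    have hlenF1 : ∀ x ∈ lvlFrom sh lm [] (r + 1), x.length = r + 1 := by
      intro x hx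
      have := lvlFrom_length sh lm (r + 1) [] x hx
      simpa using this
    rw [loopA_succ_eq, if_pos (by omega : (r : Int) - 1 < (r : Int))]
    have hbody := bodyA_eq sh lm D (lvlFrom sh lm [] r) (fun d hd => (hD d hd).1)
    rw [← lvlFrom_succ_right sh lm r []] at hbody
    by_cases hnext : lvlFrom sh lm [] (r + 1) = []
    · -- final round: the frontier is fully dead
      have hdeadF : ∀ f ∈ lvlFrom sh lm [] r, variants f sh lm = [] := by
        have := lvlFrom_succ_right sh lm r ([] : List Int)
        rw [hnext] at this
        exact fun f hf => (List.flatMap_eq_nil_iff.mp this.symm) f hf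
      have hfilt : (lvlFrom sh lm [] r).filter (fun f => decide (variants f sh lm = []))
          = lvlFrom sh lm [] r := by
        rw [List.filter_eq_self]
        intro f hf; exact decide_eq_true (hdeadF f hf)
      rw [hnext, hfilt, List.append_nil] at hbody
      rw [hbody]
      have hrK2 : r = K := by
        by_contra hne
        exact hK1 (lvlFrom_empty_mono sh lm [] (k := r + 1) (by omega) (by omega) hnext)
      have hS2ne : D ++ lvlFrom sh lm [] r ≠ [] := by
        intro hcon
        exact hlvlr (List.append_eq_nil_iff.mp hcon).2
      have hS2len : ∀ x ∈ D ++ lvlFrom sh lm [] r, x ≠ [] := by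
        intro x hx hxnil
        subst hxnil
        rcases List.mem_append.mp hx with hx | hx
        · have := (hD [] hx).2.1; simp at this
        · have := hlenF [] hx; simp at this; omega
      rw [headD_len_ne_zero hS2ne hS2len, if_neg (by simp)]
      have hmax : (match PySem.List.max? (D ++ lvlFrom sh lm [] r) (fun s => PySem.List.len s) with
          | some mx => PySem.List.len mx
          | none => 0) = ((r : Nat) : Int) := by
        apply max?_len_eq
        · rcases List.exists_mem_of_ne_nil _ hlvlr with ⟨w, hw⟩
          exact ⟨w, List.mem_append.mpr (Or.inr hw), hlenF w hw⟩
        · intro x hx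
          rcases List.mem_append.mp hx with hx | hx
          · have := (hD x hx).2.2; omega
          · exact le_of_eq (hlenF x hx)
      rw [hmax]
      cases fuel with
      | zero => omega
      | succ fuel' =>
        rw [loopA_succ_eq, if_neg (by omega : ¬ ((r : Int) < (r : Int)))]
        have hfilt2 : (D ++ lvlFrom sh lm [] r).filter
            (fun s => PySem.List.len s == ((r : Nat) : Int)) = lvlFrom sh lm [] r := by
          rw [List.filter_append]
          have h1 : D.filter (fun s => PySem.List.len s == ((r : Nat) : Int)) = [] := by
            rw [List.filter_eq_nil_iff]
            intro d hd
            have := (hD d hd).2.2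
            simp only [PySem.List.len_eq, beq_iff_eq]
            omega
          have h2 : (lvlFrom sh lm [] r).filter
              (fun s => PySem.List.len s == ((r : Nat) : Int)) = lvlFrom sh lm [] r := by
            rw [List.filter_eq_self]
            intro f hf
            have := hlenF f hf
            simp only [PySem.List.len_eq, beq_iff_eq]
            omega
          rw [h1, h2, List.nil_append]
        rw [hfilt2, hrK2]
    · -- the frontier grew: recurse
      rw [hbody]
      have hrK1 : r + 1 ≤ K := by
        by_contra hc
        have : r = K := by omega
        subst this
        exact hnext hK2
      have hS2ne : (D ++ (lvlFrom sh lm [] r).filter (fun f => decide (variants f sh lm = [])))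
          ++ lvlFrom sh lm [] (r + 1) ≠ [] := by
        intro hcon
        exact hnext (List.append_eq_nil_iff.mp hcon).2
      have hS2len : ∀ x ∈ (D ++ (lvlFrom sh lm [] r).filter
            (fun f => decide (variants f sh lm = []))) ++ lvlFrom sh lm [] (r + 1), x ≠ [] := by
        intro x hx hxnil
        subst hxnil
        rcases List.mem_append.mp hx with hx | hx
        · rcases List.mem_append.mp hx with hx | hx
          · have := (hD [] hx).2.1; simp at this
          · have := hlenF [] (List.mem_of_mem_filter hx); simp at this; omega
        · have := hlenF1 [] hx; simp at this
      rw [headD_len_ne_zero hS2ne hS2len, if_neg (by simp)]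
      have hmax : (match PySem.List.max? ((D ++ (lvlFrom sh lm [] r).filter
            (fun f => decide (variants f sh lm = []))) ++ lvlFrom sh lm [] (r + 1))
            (fun s => PySem.List.len s) with
          | some mx => PySem.List.len mx
          | none => 0) = (((r + 1 : Nat)) : Int) := by
        apply max?_len_eq
        · rcases List.exists_mem_of_ne_nil _ hnext with ⟨w, hw⟩
          exact ⟨w, List.mem_append.mpr (Or.inr hw), hlenF1 w hw⟩
        · intro x hx
          rcases List.mem_append.mp hx with hx | hx
          · rcases List.mem_append.mp hx with hx | hx
            · have := (hD x hx).2.2; omega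
            · have := hlenF x (List.mem_of_mem_filter hx); omega
          · exact le_of_eq (hlenF1 x hx)
      rw [hmax]
      have hcast : (r : Int) = ((r + 1 : Nat) : Int) - 1 := by push_cast; ring
      rw [hcast]
      apply ihf (r + 1)
      · omega
      · exact hrK1
      · exact hnext
      · intro d hd
        rcases List.mem_append.mp hd with hd | hd
        · have := hD d hd
          exact ⟨this.1, this.2.1, by omega⟩
        · have hmem := List.mem_of_mem_filter hd
          have hdead := List.of_mem_filter hd
          refine ⟨of_decide_eq_true hdead, ?_, ?_⟩
          · have := hlenF d hmem; omega
          · have := hlenF d hmem; omega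
      · omega

-- ===== B-side dfs lemmas =====

lemma dfsMerge_zero_right (b : Nat × List (List Int)) : dfsMerge b (0, []) = b := by
  unfold dfsMerge
  rcases b with ⟨d, L⟩
  by_cases h : d = 0 <;> simp [h]

lemma dfsMerge_zero_left (c : Nat × List (List Int)) : dfsMerge (0, []) c = c := by
  rcases c with ⟨d, L⟩
  unfold dfsMerge
  dsimp only
  rcases Nat.eq_zero_or_pos d with h | h
  · subst h; simp
  · rw [if_pos h]

lemma dfsMerge_assoc (a b c : Nat × List (List Int)) :
    dfsMerge (dfsMerge a b) c = dfsMerge a (dfsMerge b c) := by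
  rcases a with ⟨da, La⟩; rcases b with ⟨db, Lb⟩; rcases c with ⟨dc, Lc⟩
  unfold dfsMerge
  dsimp only
  split_ifs <;> simp_all <;> omega

lemma dfsGo_eq_KB (sh : List Char) (lm : List (List Char)) (s : List Int) :
    ∀ (avail : List Int) (b : Nat × List (List Int)),
      dfsGo sh lm s avail b = dfsMerge b (KB sh lm s avail) := by
  intro avail
  induction avail with
  | nil => intro b; rw [dfsGo, KB, dfsMerge_zero_right]
  | cons j rest ih =>
    intro b
    rw [dfsGo, KB]
    by_cases hg : good (s ++ [j]) sh lm
    · rw [if_pos hg, if_pos hg, ih, dfsMerge_assoc]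
    · rw [if_neg hg, if_neg hg, ih, dfsMerge_zero_left]

lemma dfsMerge_of_gt {b c : Nat × List (List Int)} (h : b.1 < c.1) : dfsMerge b c = c := by
  unfold dfsMerge; rw [if_pos h]

lemma dfsMerge_of_eq {b c : Nat × List (List Int)} (h : c.1 = b.1) :
    dfsMerge b c = (b.1, b.2 ++ c.2) := by
  unfold dfsMerge; rw [if_neg (by omega), if_pos h]

lemma dfsMerge_of_lt {b c : Nat × List (List Int)} (h : c.1 < b.1) : dfsMerge b c = b := by
  unfold dfsMerge; rw [if_neg (by omega), if_neg (by omega)]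

def CKstmt (sh : List Char) (lm : List (List Char)) (s : List Int) (t : Int) : Prop :=
  (lvlFromT sh lm s t 1 = [] ∧ KB sh lm s (PySem.List.pyRange t (sh.length : Int) 1) = (0, [])) ∨
  (∃ d, KB sh lm s (PySem.List.pyRange t (sh.length : Int) 1) =
      (s.length + 1 + d, lvlFromT sh lm s t (d + 1)) ∧
    lvlFromT sh lm s t (d + 1) ≠ [] ∧ lvlFromT sh lm s t (d + 2) = [])

def CNstmt (sh : List Char) (lm : List (List Char)) (s : List Int) (t : Int) : Prop :=
  ∃ d, dfsNode sh lm s (PySem.List.pyRange t (sh.length : Int) 1) =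
      (s.length + d, lvlFromT sh lm s t d) ∧
    lvlFromT sh lm s t d ≠ [] ∧ lvlFromT sh lm s t (d + 1) = []

lemma CK_CN (sh : List Char) (lm : List (List Char)) :
    ∀ (m : Nat) (t : Int), ((sh.length : Int) - t).toNat = m → 0 ≤ t →
      (∀ s, CKstmt sh lm s t) ∧ (∀ s, CNstmt sh lm s t) := by
  intro m
  induction m using Nat.strong_induction_on with
  | _ m ih =>
    intro t hm ht
    have hmain : ∀ s, CKstmt sh lm s t := by
      intro s
      unfold CKstmt
      by_cases hge : (sh.length : Int) ≤ t
      · left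
        exact ⟨lvlFromT_ge sh lm s t hge 0, by rw [PySem.List.pyRange_one_eq_nil hge]; rfl⟩
      · rw [not_le] at hge
        have hr := PySem.List.pyRange_one_cons hge
        obtain ⟨ihCK, ihCN⟩ := ih (m - 1) (by omega) (t + 1) (by omega) (by omega)
        rw [hr, KB]
        have hcanon : ∀ k, lvlFromT sh lm (s ++ [t]) (t + 1) k = lvlFrom sh lm (s ++ [t]) k := by
          intro k; rw [← startOf_append s t, lvlFromT_canon]
        have hconsT : ∀ k, lvlFromT sh lm s t (k + 1) =
            (if good (s ++ [t]) sh lm then lvlFrom sh lm (s ++ [t]) k else [])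
              ++ lvlFromT sh lm s (t + 1) (k + 1) := fun k => lvlFromT_cons sh lm s t hge k
        by_cases hg : good (s ++ [t]) sh lm
        · rw [if_pos hg]
          obtain ⟨dt, hnode, hne, hemp⟩ := ihCN (s ++ [t])
          unfold CNstmt at *
          rw [hcanon] at hnode hne hemp
          rw [hnode]
          have hlen : (s ++ [t]).length = s.length + 1 := by simp
          rcases ihCK s with ⟨hL1, hKB⟩ | ⟨d', hKB, hne', hemp'⟩
          · rw [hKB, dfsMerge_zero_right]
            have hRe : ∀ k, 1 ≤ k → lvlFromT sh lm s (t + 1) k = [] := fun k hk =>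
              lvlFromT_empty_mono sh lm s (t + 1) le_rfl hk hL1
            right; refine ⟨dt, ?_, ?_, ?_⟩
            · rw [hconsT dt, if_pos hg, hRe (dt + 1) (by omega), List.append_nil, hlen]
            · rw [hconsT dt, if_pos hg, hRe (dt + 1) (by omega), List.append_nil]; exact hne
            · rw [hconsT (dt + 1), if_pos hg, hemp, hRe (dt + 2) (by omega)]; rfl
          · rw [hKB]
            rcases lt_trichotomy dt d' with hlt | heq | hgt
            · rw [dfsMerge_of_gt (by simp [hlen]; omega)]
              have hAe : lvlFrom sh lm (s ++ [t]) d' = [] :=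
                lvlFrom_empty_mono sh lm (s ++ [t]) (k := dt + 1) (by omega) (by omega) hemp
              have hAe2 : lvlFrom sh lm (s ++ [t]) (d' + 1) = [] :=
                lvlFrom_empty_mono sh lm (s ++ [t]) (k := dt + 1) (by omega) (by omega) hemp
              right; refine ⟨d', ?_, ?_, ?_⟩
              · rw [hconsT d', if_pos hg, hAe, List.nil_append]
              · rw [hconsT d', if_pos hg, hAe, List.nil_append]; exact hne'
              · rw [hconsT (d' + 1), if_pos hg, hAe2, hemp']; rfl
            · subst heq
              rw [dfsMerge_of_eq (by simp [hlen])]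
              right; refine ⟨dt, ?_, ?_, ?_⟩
              · rw [hconsT dt, if_pos hg, hlen]
              · rw [hconsT dt, if_pos hg]
                intro hcontra
                exact hne (List.append_eq_nil_iff.mp hcontra).1
              · rw [hconsT (dt + 1), if_pos hg, hemp, hemp']; rfl
            · rw [dfsMerge_of_lt (by simp [hlen]; omega)]
              have hBe : lvlFromT sh lm s (t + 1) (dt + 1) = [] :=
                lvlFromT_empty_mono sh lm s (t + 1) (k := d' + 2) (by omega) (by omega) hemp'
              have hBe2 : lvlFromT sh lm s (t + 1) (dt + 2) = [] :=
                lvlFromT_empty_mono sh lm s (t + 1) (k := d' + 2) (by omega) (by omega) hemp'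
              right; refine ⟨dt, ?_, ?_, ?_⟩
              · rw [hconsT dt, if_pos hg, hBe, List.append_nil, hlen]
              · rw [hconsT dt, if_pos hg, hBe, List.append_nil]; exact hne
              · rw [hconsT (dt + 1), if_pos hg, hemp, hBe2]; rfl
        · rw [if_neg hg, dfsMerge_zero_left]
          have hsame : ∀ k, lvlFromT sh lm s t (k + 1) = lvlFromT sh lm s (t + 1) (k + 1) := by
            intro k; rw [hconsT k, if_neg hg, List.nil_append]
          rcases ihCK s with ⟨hL1, hKB⟩ | ⟨d', hKB, hne', hemp'⟩
          · left; exact ⟨by rw [hsame 0]; exact hL1, hKB⟩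
          · right; exact ⟨d', by rw [hsame d']; exact hKB,
              by rw [hsame d']; exact hne', by rw [hsame (d' + 1)]; exact hemp'⟩
    refine ⟨hmain, ?_⟩
    intro s
    unfold CNstmt
    rw [dfsNode, dfsGo_eq_KB]
    rcases hmain s with ⟨hL1, hKB⟩ | ⟨d, hKB, hne, hemp⟩
    · rw [hKB, dfsMerge_zero_right]
      exact ⟨0, by simp [lvlFromT], by simp [lvlFromT], hL1⟩
    · rw [hKB, dfsMerge_of_gt (by simp; omega)]
      exact ⟨d + 1, by rw [show s.length + (d + 1) = s.length + 1 + d from by omega], hne, hemp⟩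

lemma d_le_len (sh : List Char) (lm : List (List Char)) {d : Nat}
    (hne : lvlFrom sh lm [] d ≠ []) : d ≤ sh.length := by
  by_contra hc
  exact hne (lvlFrom_empty_mono sh lm [] (k := sh.length + 1) (by omega) (by omega)
    (lvlFrom_top_empty sh lm))

-- ===== VERDICT (by name: the statement is the Claim_ definition above) =====
theorem get_schemata_spec : Claim_equal_get_schemata := by
  intro lemmas _ _
  unfold Spec_get_schemata
  cases hmin : PySem.List.min? lemmas (fun s => PySem.Str.len s) with
  | none => unfold get_schemata get_schemata_alt; rw [hmin]
  | some shS =>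
    have hAeq : get_schemata lemmas =
        loopA shS.toList (lemmas.map String.toList) (shS.toList.length + 2) (-1) 0 [[]] := by
      unfold get_schemata; rw [hmin]
    have hBeq : get_schemata_alt lemmas =
        (if (dfsNode shS.toList (lemmas.map String.toList) []
              (PySem.List.pyRange 0 (shS.toList.length : Int) 1)).1 == 0 then []
          else (dfsNode shS.toList (lemmas.map String.toList) []
              (PySem.List.pyRange 0 (shS.toList.length : Int) 1)).2.map (formatR shS.toList)) := by
      unfold get_schemata_alt; rw [hmin]
    rw [hAeq, hBeq]
    obtain ⟨-, hCN⟩ := CK_CN shS.toList (lemmas.map String.toList)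
      (((shS.toList.length : Int) - 0).toNat) 0 rfl le_rfl
    obtain ⟨d, hnode, hne, hemp⟩ := hCN []
    have hcanon : ∀ k, lvlFromT shS.toList (lemmas.map String.toList) [] 0 k
        = lvlFrom shS.toList (lemmas.map String.toList) [] k := by
      intro k
      rw [show (0 : Int) = startOf ([] : List Int) from rfl, lvlFromT_canon]
    rw [hcanon] at hnode hne hemp
    rw [hnode]
    rw [show shS.toList.length + 2 = (shS.toList.length + 1) + 1 from rfl, loopA_succ_eq,
      if_pos (by omega : (-1 : Int) < 0)]
    have hb1 : ([[]] : List (List Int)).foldl (stepA shS.toList (lemmas.map String.toList)) [[]]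
        = stepA shS.toList (lemmas.map String.toList) [[]] [] := by
      rw [List.foldl_cons, List.foldl_nil]
    by_cases hv : variants [] shS.toList (lemmas.map String.toList) = []
    · -- no common character: both return []
      have hd0 : d = 0 := by
        by_contra hc
        exact hne (lvlFrom_empty_mono shS.toList (lemmas.map String.toList) [] (k := 1)
          le_rfl (by omega) (by rw [lvlFrom_one]; exact hv))
      have hstep : stepA shS.toList (lemmas.map String.toList) [[]] [] = [[]] := by
        simp [stepA, hv]
      rw [hb1, hstep]
      simp [hd0]
    · -- at least one good single position
      have hd1 : 1 ≤ d := by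
        by_contra hc
        have : d = 0 := by omega
        subst this
        rw [lvlFrom_one] at hemp
        exact hv hemp
      have hlvl1 : lvlFrom shS.toList (lemmas.map String.toList) [] 1 ≠ [] := by
        rw [lvlFrom_one]; exact hv
      have hstep : stepA shS.toList (lemmas.map String.toList) [[]] []
          = variants [] shS.toList (lemmas.map String.toList) := by
        show (if 0 < (variants [] shS.toList (lemmas.map String.toList)).length ∧
              ([] : List Int) ∈ [([] : List Int)]
            then (PySem.List.remove? [[]] ([] : List Int)).getD [[]] else [[]])
            ++ variants [] shS.toList (lemmas.map String.toList) = _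
        rw [if_pos ⟨List.length_pos_iff.mpr hv, by simp⟩, PySem.List.remove?_cons_self,
          Option.getD_some, List.nil_append]
      rw [hb1, hstep]
      have hlen1 : ∀ x ∈ variants [] shS.toList (lemmas.map String.toList), x.length = 1 := by
        intro x hx
        rcases variants_shape [] shS.toList (lemmas.map String.toList) hx with ⟨j, rfl, -, -⟩
        simp
      rw [headD_len_ne_zero hv (fun x hx => by
        intro hxnil; subst hxnil; have := hlen1 [] hx; simp at this), if_neg (by simp)]
      have hmax : (match PySem.List.max? (variants [] shS.toList (lemmas.map String.toList))
            (fun s => PySem.List.len s) with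
          | some m => PySem.List.len m
          | none => 0) = ((1 : Nat) : Int) := by
        apply max?_len_eq
        · rcases List.exists_mem_of_ne_nil _ hv with ⟨w, hw⟩
          exact ⟨w, hw, hlen1 w hw⟩
        · exact fun x hx => le_of_eq (hlen1 x hx)
      rw [hmax, show (0 : Int) = ((1 : Nat) : Int) - 1 from by norm_num,
        show variants [] shS.toList (lemmas.map String.toList)
            = [] ++ lvlFrom shS.toList (lemmas.map String.toList) [] 1 from by
          rw [lvlFrom_one, List.nil_append]]
      rw [loopA_run shS.toList (lemmas.map String.toList) d hne hemp
        (shS.toList.length + 1) 1 [] le_rfl hd1 hlvl1 (by simp)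
        (by have := d_le_len shS.toList (lemmas.map String.toList) hne; omega)]
      simp [Nat.pos_iff_ne_zero.mp hd1]
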